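-- pv_equiv track=rewrite | github.com/axiopaladin/markdown-crossref | markdown-crossref.py | find_refs
-- ===== SOURCE A (Python) =====
-- def find_refs(lines: list, labels: list):
--     """Return a dict of refs and their positions"""
--     refs = {}
--     N = len(lines)
--     for y in range(N): # line by line
--         lStart = False
--         line = lines[y]
--         n = len(line)
--         for x in range(1,n): # character by character
--             if (not lStart) and (line[(x-1):(x+1)] == "[@"):
--                 # Searching for the opening `[@` of a ref
--                 lStart = True
--                 open_position = x+1
--
--             if lStart and (line[x] == "]"):
--                 # Searching for the closing `]` of a ref
--                 lStart = False
--                 end_position = x-1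
--                 label = line[open_position:end_position+1].lower()
--                 if label in labels:
--                     if label in refs.keys():
--                         refs[label].append(((y, (open_position-2, end_position+2))))
--                     else:
--                         refs[label] = [(y, (open_position-2, end_position+2))]
--     # example output:
--     # {"sec:title1": [(1,  (94, 107)), (4, (123, 136))],
--     # "sec:results": [(4, (143, 157)), (4, (293, 307))]}
--     return refs
-- ===== SOURCE B (Python) =====
-- def find_refs(lines: list, labels: list):
--     """Return a dict of refs and their positions"""
--     refs = {}
--     for y, line in enumerate(lines):
--         pos = 0
--         while True:
--             i = line.find("[@", pos)
--             if i == -1: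
--                 break
--             j = line.find("]", i + 2)
--             if j == -1:
--                 break
--             label = line[i + 2:j].lower()
--             if label in labels:
--                 refs.setdefault(label, []).append((y, (i, j + 1)))
--             pos = j + 1
--     return refs
-- ===== Notes on version B (the rewrite author's own statement) =====
-- stated objective: idiomatic
-- what changed: Replaced A's character-by-character two-flag state machine (slicing line[x-1:x+1] at every index) with an idiomatic find-and-jump loop: str.find locates the next "[@" and its closing "]" and the scan jumps past each match.
import Mathlib
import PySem

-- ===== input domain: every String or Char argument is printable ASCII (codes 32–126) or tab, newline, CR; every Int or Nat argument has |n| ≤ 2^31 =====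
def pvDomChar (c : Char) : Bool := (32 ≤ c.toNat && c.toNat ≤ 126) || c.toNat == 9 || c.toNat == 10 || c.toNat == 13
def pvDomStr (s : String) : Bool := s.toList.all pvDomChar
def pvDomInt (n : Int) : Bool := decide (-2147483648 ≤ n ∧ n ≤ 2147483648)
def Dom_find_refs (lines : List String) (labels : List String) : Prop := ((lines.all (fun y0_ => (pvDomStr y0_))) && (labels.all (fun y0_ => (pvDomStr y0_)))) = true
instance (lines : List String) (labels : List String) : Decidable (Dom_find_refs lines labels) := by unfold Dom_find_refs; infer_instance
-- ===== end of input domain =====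

-- B replaces A's character-by-character two-state scanner with a find-and-jump loop
-- (str.find for the next "[@" and its closing "]", then jump past the match): simpler/idiomatic, same return value.

-- ===== PORT A =====
-- A-side helper: the body of A's inner per-character loop; state = (lStart, open_position, refs).
def pvAstep (cs : List Char) (y : Int) (labels : List String)
    (st : Bool × Int × PySem.Dict String (List (Int × (Int × Int)))) (x : Int) :
    Bool × Int × PySem.Dict String (List (Int × (Int × Int))) :=
  let st1 :=
    if !st.1 && decide (PySem.List.slice cs (some (x - 1)) (some (x + 1)) = ['[', '@']) then
      (true, x + 1, st.2.2)
    else st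
  if st1.1 && decide (PySem.List.pyGet? cs x = some ']') then
    let endPos := x - 1
    let label : String :=
      String.ofList (PySem.Chars.lower (PySem.List.slice cs (some st1.2.1) (some (endPos + 1))))
    if label ∈ labels then
      match st1.2.2.get? label with
      | some l => (false, st1.2.1, st1.2.2.insert label (l ++ [(y, (st1.2.1 - 2, endPos + 2))]))
      | none   => (false, st1.2.1, st1.2.2.insert label [(y, (st1.2.1 - 2, endPos + 2))])
    else (false, st1.2.1, st1.2.2)
  else st1

def find_refs (lines : List String) (labels : List String) : List (String × List (Int × (Int × Int))) :=
  let N : Int := PySem.List.len lines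
  ((PySem.List.pyRange 0 N).foldl (fun refs y =>
      let line := PySem.List.pyGetD lines y ""
      let cs := line.toList
      let n : Int := PySem.Chars.len cs
      ((PySem.List.pyRange 1 n).foldl (pvAstep cs y labels) (false, 0, refs)).2.2)
    PySem.Dict.empty).items

-- ===== PORT B =====
-- B-side helper: B's while-loop over one line; the fuel argument only makes the loop total
-- (pos strictly increases and stays ≤ length, so length + 1 iterations always suffice).
def pvBscan (cs : List Char) (y : Int) (labels : List String)
    (refs : PySem.Dict String (List (Int × (Int × Int)))) (pos : Int) :
    Nat → PySem.Dict String (List (Int × (Int × Int)))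
  | 0 => refs
  | fuel + 1 =>
    let i := PySem.Chars.findFrom cs ['[', '@'] pos
    if i = -1 then refs
    else
      let j := PySem.Chars.findFrom cs [']'] (i + 2)
      if j = -1 then refs
      else
        let label : String := String.ofList (PySem.Chars.lower (PySem.List.slice cs (some (i + 2)) (some j)))
        let refs' :=
          if label ∈ labels then refs.insert label (refs.getD label [] ++ [(y, (i, j + 1))])
          else refs
        pvBscan cs y labels refs' (j + 1) fuel

def find_refs_alt (lines : List String) (labels : List String) : List (String × List (Int × (Int × Int))) :=
  ((PySem.List.enumerate lines).foldl (fun refs p =>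
      pvBscan p.2.toList p.1 labels refs 0 (p.2.toList.length + 1)) PySem.Dict.empty).items

-- ===== PRECONDITION & SPEC =====
def Spec_find_refs (lines : List String) (labels : List String) (out : List (String × List (Int × (Int × Int)))) : Prop := out = find_refs_alt lines labels
instance (lines : List String) (labels : List String) (out : List (String × List (Int × (Int × Int)))) : Decidable (Spec_find_refs lines labels out) := by unfold Spec_find_refs; infer_instance

-- ===== CLAIM (what is proved, stated in full; the proofs are below) =====
def Claim_equal_find_refs : Prop := ∀ (lines : List String) (labels : List String), Dom_find_refs lines labels → Spec_find_refs lines labels (find_refs lines labels)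

-- ===== LEMMAS AND PROOFS =====

-- a fold whose step fixes the given state returns it unchanged
theorem pvFoldlFixed {α β : Type} (f : α → β → α) (l : List β) (s : α)
    (h : ∀ x ∈ l, f s x = s) : l.foldl f s = s := by
  induction l with
  | nil => rfl
  | cons a l ih =>
      simp only [List.foldl_cons, h a (List.mem_cons_self)]
      exact ih (fun x hx => h x (List.mem_cons_of_mem a hx))

-- a prefix of cs.drop a is an infix of cs.drop p for p ≤ a
theorem pvPrefixDropInfix {cs l : List Char} {a p : Nat} (hpa : p ≤ a)
    (hp : l <+: cs.drop a) : l <:+: cs.drop p := by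
  have : cs.drop a = (cs.drop p).drop (a - p) := by rw [List.drop_drop]; congr 1; omega
  rw [this] at hp
  exact hp.isInfix.trans (List.drop_suffix _ _).isInfix

-- a character at index a yields the singleton prefix of the corresponding drop
theorem pvGetPrefix {cs : List Char} {a : Nat} {c : Char} (h : cs[a]? = some c) :
    [c] <+: cs.drop a := by
  have hh : (cs.drop a).head? = some c := by
    rw [List.head?_eq_getElem?, List.getElem?_drop]; simpa using h
  cases hd : cs.drop a with
  | nil => rw [hd] at hh; simp at hh
  | cons d rest =>
      rw [hd] at hh; simp at hh
      exact ⟨rest, by simp [hh]⟩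

theorem pvScanEq (cs : List Char) (y : Int) (labels : List String) :
    ∀ (fuel : Nat) (p : Nat) (o : Int) (refs : PySem.Dict String (List (Int × (Int × Int)))),
      p ≤ cs.length → cs.length + 1 - p ≤ fuel →
      ((PySem.List.pyRange ((p : Int) + 1) (PySem.Chars.len cs)).foldl
          (pvAstep cs y labels) (false, o, refs)).2.2
        = pvBscan cs y labels refs (p : Int) fuel := by
  intro fuel
  induction fuel with
  | zero => intro p o refs hp hf; omega
  | succ fuel ih =>
    intro p o refs hp hf
    rw [PySem.Chars.len_eq]
    by_cases h1 : PySem.Chars.findFrom cs ['[', '@'] (p : Int) = -1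
    · -- no further "[@": both sides return refs unchanged
      have hno : ¬ (['[', '@'] <:+: cs.drop p) :=
        (PySem.Chars.findFrom_natCast_eq_neg_one_iff cs _ p hp).mp h1
      have hfix : ∀ x ∈ PySem.List.pyRange ((p : Int) + 1) (cs.length : Int),
          pvAstep cs y labels (false, o, refs) x = (false, o, refs) := by
        intro x hx
        rw [PySem.List.mem_pyRange_one] at hx
        have hslice : ¬ (PySem.List.slice cs (some (x - 1)) (some (x + 1)) = ['[', '@']) := by
          intro hs
          have hxa : x - 1 = (((x - 1).toNat : Nat) : Int) := by omega
          have hx1 : x + 1 = ((((x - 1).toNat + 2) : Nat) : Int) := by omega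
          rw [hxa, hx1, PySem.List.slice_natCast] at hs
          have hpre : ['[', '@'] <+: cs.drop (x - 1).toNat := by
            rw [List.prefix_iff_eq_take]; simpa using hs.symm
          exact hno (pvPrefixDropInfix (by omega) hpre)
        simp [pvAstep, hslice]
      rw [pvFoldlFixed _ _ _ hfix, pvBscan]
      simp [h1]
    · -- first "[@" at index iN
      obtain ⟨hpi, hpre, hmin⟩ := PySem.Chars.findFrom_natCast_spec cs ['[', '@'] p hp h1
      set i := PySem.Chars.findFrom cs ['[', '@'] (p : Int) with hidef
      have hiv : i = (i.toNat : Int) := by omega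
      set iN := i.toNat with hiN
      obtain ⟨t, ht⟩ := hpre
      have hlen2 : iN + 2 ≤ cs.length := by
        have := congrArg List.length ht
        simp [List.length_drop] at this
        omega
      -- split A's fold at the opener
      rw [PySem.List.pyRange_one_append ((p : Int) + 1) ((iN : Int) + 1) (cs.length : Int)
            (by omega) (by omega), List.foldl_append]
      have hfix1 : ∀ x ∈ PySem.List.pyRange ((p : Int) + 1) ((iN : Int) + 1),
          pvAstep cs y labels (false, o, refs) x = (false, o, refs) := by
        intro x hx
        rw [PySem.List.mem_pyRange_one] at hx
        have hslice : ¬ (PySem.List.slice cs (some (x - 1)) (some (x + 1)) = ['[', '@']) := by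
          intro hs
          have hxa : x - 1 = (((x - 1).toNat : Nat) : Int) := by omega
          have hx1 : x + 1 = ((((x - 1).toNat + 2) : Nat) : Int) := by omega
          rw [hxa, hx1, PySem.List.slice_natCast] at hs
          have hpre' : ['[', '@'] <+: cs.drop (x - 1).toNat := by
            rw [List.prefix_iff_eq_take]; simpa using hs.symm
          exact hmin (x - 1).toNat (by omega) (by omega) hpre'
        simp [pvAstep, hslice]
      rw [pvFoldlFixed _ _ _ hfix1]
      rw [PySem.List.pyRange_one_cons (show (iN : Int) + 1 < (cs.length : Int) by omega),
          List.foldl_cons]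
      -- the opener step turns the state on
      have hsl : PySem.List.slice cs (some ((iN : Int))) (some ((iN : Int) + 1 + 1)) = ['[', '@'] := by
        have e2 : (iN : Int) + 1 + 1 = (((iN + 2) : Nat) : Int) := by omega
        rw [e2, show ((iN : Int)) = ((iN : Nat) : Int) from rfl, PySem.List.slice_natCast, ← ht]
        simp
      have hget : PySem.List.pyGet? cs ((iN : Int) + 1) = some '@' := by
        have e1 : ((iN : Int) + 1) = (((iN + 1) : Nat) : Int) := by omega
        rw [e1, PySem.List.pyGet?_natCast]
        have e2 : cs[iN + 1]? = (cs.drop iN)[1]? := by rw [List.getElem?_drop]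
        rw [e2, ← ht]
        simp
      have hstep1 : pvAstep cs y labels (false, o, refs) ((iN : Int) + 1)
          = (true, (iN : Int) + 2, refs) := by
        simp [pvAstep, hsl, hget]
        rw [show ((iN : Int) + 1 + 1) = (iN : Int) + 2 by ring]
      rw [hstep1]
      have e5 : (iN : Int) + 1 + 1 = (iN : Int) + 2 := by ring
      rw [e5]
      by_cases h2 : PySem.Chars.findFrom cs [']'] (((iN + 2 : Nat)) : Int) = -1
      · -- no closing "]": both sides return refs unchanged
        have hno2 : ¬ ([']'] <:+: cs.drop (iN + 2)) :=
          (PySem.Chars.findFrom_natCast_eq_neg_one_iff cs _ (iN + 2) hlen2).mp h2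
        have hfix2 : ∀ x ∈ PySem.List.pyRange ((iN : Int) + 2) (cs.length : Int),
            pvAstep cs y labels (true, (iN : Int) + 2, refs) x = (true, (iN : Int) + 2, refs) := by
          intro x hx
          rw [PySem.List.mem_pyRange_one] at hx
          have hgx : ¬ (PySem.List.pyGet? cs x = some ']') := by
            intro hg
            have hxa : x = ((x.toNat : Nat) : Int) := by omega
            rw [hxa, PySem.List.pyGet?_natCast] at hg
            exact hno2 (pvPrefixDropInfix (by omega) (pvGetPrefix hg))
          simp [pvAstep, hgx]
        rw [pvFoldlFixed _ _ _ hfix2]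
        conv_rhs => rw [pvBscan]
        have h2' : PySem.Chars.findFrom cs [']'] ((iN : Int) + 2) = -1 := by
          rw [show ((iN : Int) + 2) = (((iN + 2) : Nat) : Int) by push_cast; ring]
          exact h2
        simp only [← hidef]
        simp [hiv]
        intro hcon
        exact absurd h2' hcon
      · -- closing "]" at index jN: the emit step, then recurse
        obtain ⟨hji, hpre2, hmin2⟩ := PySem.Chars.findFrom_natCast_spec cs [']'] (iN + 2) hlen2 h2
        set j := PySem.Chars.findFrom cs [']'] (((iN + 2 : Nat)) : Int) with hjdef
        have hjv : j = (j.toNat : Int) := by omega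
        set jN := j.toNat with hjN
        obtain ⟨t2, ht2⟩ := hpre2
        have hjlt : jN < cs.length := by
          have := congrArg List.length ht2
          simp [List.length_drop] at this
          omega
        have hij : iN + 2 ≤ jN := by omega
        rw [PySem.List.pyRange_one_append ((iN : Int) + 2) ((jN : Int)) (cs.length : Int)
              (by omega) (by omega), List.foldl_append]
        have hfix3 : ∀ x ∈ PySem.List.pyRange ((iN : Int) + 2) ((jN : Int)),
            pvAstep cs y labels (true, (iN : Int) + 2, refs) x = (true, (iN : Int) + 2, refs) := by
          intro x hx
          rw [PySem.List.mem_pyRange_one] at hx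
          have hgx : ¬ (PySem.List.pyGet? cs x = some ']') := by
            intro hg
            have hxa : x = ((x.toNat : Nat) : Int) := by omega
            rw [hxa, PySem.List.pyGet?_natCast] at hg
            exact hmin2 x.toNat (by omega) (by omega) (pvGetPrefix hg)
          simp [pvAstep, hgx]
        rw [pvFoldlFixed _ _ _ hfix3]
        rw [PySem.List.pyRange_one_cons (show (jN : Int) < (cs.length : Int) by omega),
            List.foldl_cons]
        have hgetj : PySem.List.pyGet? cs ((jN : Int)) = some ']' := by
          rw [show ((jN : Int)) = ((jN : Nat) : Int) from rfl, PySem.List.pyGet?_natCast]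
          have e2 : cs[jN]? = (cs.drop jN)[0]? := by rw [List.getElem?_drop]; norm_num
          rw [e2, ← ht2]
          simp
        set lab : String := String.ofList (PySem.Chars.lower
            (PySem.List.slice cs (some ((iN : Int) + 2)) (some ((jN : Int))))) with hlab
        have hstep2 : pvAstep cs y labels (true, (iN : Int) + 2, refs) ((jN : Int))
            = (false, (iN : Int) + 2,
                if lab ∈ labels then
                  refs.insert lab (refs.getD lab [] ++ [(y, ((iN : Int), (jN : Int) + 1))])
                else refs) := by
          simp only [pvAstep, hgetj]
          norm_num
          rw [show ((jN : Int) - 1 + 2) = (jN : Int) + 1 by ring]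
          split_ifs with hc
          · cases hg : refs.get? lab <;> simp [PySem.Dict.getD, hg, ← hlab]
          · rfl
        set refsE := (if lab ∈ labels then
            refs.insert lab (refs.getD lab [] ++ [(y, ((iN : Int), (jN : Int) + 1))])
          else refs) with hrefsE
        rw [hstep2]
        have hbridge : (PySem.List.pyRange ((jN : Int) + 1) (cs.length : Int)).foldl
              (pvAstep cs y labels) (false, (iN : Int) + 2, refsE)
            = (PySem.List.pyRange ((jN : Int) + 1 + 1) (cs.length : Int)).foldl
              (pvAstep cs y labels) (false, (iN : Int) + 2, refsE) := by
          by_cases hlt : jN + 1 < cs.length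
          · rw [PySem.List.pyRange_one_cons (show (jN : Int) + 1 < (cs.length : Int) by omega),
                List.foldl_cons]
            have hsl2 : ¬ (PySem.List.slice cs (some ((jN : Int))) (some ((jN : Int) + 1 + 1))
                = ['[', '@']) := by
              intro hs
              rw [show ((jN : Int) + 1 + 1) = (((jN + 2) : Nat) : Int) by push_cast; ring,
                  PySem.List.slice_natCast, ← ht2] at hs
              simp at hs
            have hid : pvAstep cs y labels (false, (iN : Int) + 2, refsE) ((jN : Int) + 1)
                = (false, (iN : Int) + 2, refsE) := by
              simp [pvAstep, hsl2]
            rw [hid]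
          · rw [PySem.List.pyRange_one_eq_nil (by omega), PySem.List.pyRange_one_eq_nil (by omega)]
        rw [hbridge]
        have hIH := ih (jN + 1) ((iN : Int) + 2) refsE (by omega) (by omega)
        rw [PySem.Chars.len_eq] at hIH
        rw [show (((jN + 1 : Nat)) : Int) + 1 = (jN : Int) + 1 + 1 by push_cast; ring] at hIH
        rw [show (((jN + 1 : Nat)) : Int) = (jN : Int) + 1 by push_cast; ring] at hIH
        rw [hIH]
        -- unfold one step of B
        conv_rhs => rw [pvBscan]
        simp only [← hidef]
        rw [show PySem.Chars.findFrom cs [']'] (i + 2) = ((jN : Int)) from by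
          rw [hiv, show ((iN : Int) + 2) = (((iN + 2) : Nat) : Int) by push_cast; ring, ← hjdef]
          exact hjv]
        rw [hiv]
        simp [hrefsE, hlab]

theorem find_refs_eq_alt (lines : List String) (labels : List String) :
    find_refs lines labels = find_refs_alt lines labels := by
  unfold find_refs find_refs_alt
  rw [PySem.List.enumerate_eq_map_pyRange lines "", List.foldl_map]
  dsimp only
  congr 1
  congr 1
  funext refs yv
  have := pvScanEq (PySem.List.pyGetD lines yv "").toList yv labels
      ((PySem.List.pyGetD lines yv "").toList.length + 1) 0 0 refs
      (Nat.zero_le _) (by omega)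
  simpa [PySem.Chars.len_eq] using this

-- ===== VERDICT (by name: the statement is the Claim_ definition above) =====
theorem find_refs_spec : Claim_equal_find_refs := by
  intro lines labels _
  unfold Spec_find_refs
  exact find_refs_eq_alt lines labels
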